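-- pv_equiv track=rewrite | github.com/yrnana/algorithm | geeksforgeeks/datastructure/stack/max_diff_near_left_right.py | find_max_diff
-- ===== SOURCE A (Python) =====
-- def leftsmaller(arr, smaller):
--     stack = []
--     for i in range(len(arr)):
--         while stack and stack[-1] >= arr[i]:
--             stack.pop()
--         smaller[i] = stack[-1] if stack else 0
--         stack.append(arr[i])
--
-- def find_max_diff(arr):
--     n = len(arr)
--     ls = [0] * n  # 왼쪽에서 자신보다 작은 수 중 가장 가까운 수
--     rs = [0] * n  # 오른쪽에서 자신보다 작은 수 중 가장 가까운 수
--
--     leftsmaller(arr, ls)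
--     leftsmaller(arr[::-1], rs)
--
--     res = -1
--     for i in range(n):
--         res = max(res, abs(ls[i] - rs[n - 1 - i]))
--     return res
-- ===== SOURCE B (Python) =====
-- def find_max_diff(arr):
--     n = len(arr)
--     res = -1
--     for i in range(n):
--         v = arr[i]
--         left = next((x for x in reversed(arr[:i]) if x < v), 0)
--         right = next((x for x in arr[i + 1:] if x < v), 0)
--         res = max(res, abs(left - right))
--     return res
-- ===== Notes on version B (the rewrite author's own statement) =====
-- stated objective: simpler
-- what changed: Replaces the two monotonic-stack passes (one over the array, one over its reversal, plus index bookkeeping) with a single loop that finds each element's nearest strictly-smaller neighbour on each side by direct scan.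
import Mathlib
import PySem

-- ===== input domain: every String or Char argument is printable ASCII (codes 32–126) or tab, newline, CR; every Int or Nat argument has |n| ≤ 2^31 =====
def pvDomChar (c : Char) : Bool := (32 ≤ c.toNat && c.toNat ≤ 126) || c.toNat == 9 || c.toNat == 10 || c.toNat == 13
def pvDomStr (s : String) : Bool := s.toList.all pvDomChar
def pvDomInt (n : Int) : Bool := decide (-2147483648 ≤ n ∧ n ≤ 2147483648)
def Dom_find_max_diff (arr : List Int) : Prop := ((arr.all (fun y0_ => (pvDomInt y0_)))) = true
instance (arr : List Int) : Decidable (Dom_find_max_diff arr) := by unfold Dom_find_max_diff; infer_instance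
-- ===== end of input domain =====

-- B replaces the two monotonic-stack passes with direct per-index scans for the
-- nearest strictly-smaller element on each side (simpler, not faster).

-- ===== PORT A =====
-- the stack is kept head-first (head = Python's stack[-1]); the while-pop loop:
def popWhile (v : Int) : List Int → List Int
  | [] => []
  | t :: s => if t ≥ v then popWhile v s else t :: s

-- Python's leftsmaller writes smaller[i] in order 0..n-1 into a zero list; here the
-- same values are appended in the same order (state = (stack, smaller)).
def leftsmaller (arr : List Int) : List Int :=
  (arr.foldl
    (fun (st : List Int × List Int) a =>
      let s := popWhile a st.1
      (a :: s, st.2 ++ [s.headD 0]))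
    ([], [])).2

def find_max_diff (arr : List Int) : Int :=
  let n := arr.length
  let ls := leftsmaller arr
  let rs := leftsmaller arr.reverse
  (List.range n).foldl (fun res i => max res |ls.getD i 0 - rs.getD (n - 1 - i) 0|) (-1)

-- ===== PORT B =====
-- next((x for x in xs if x < v), 0)
def nearestLT (v : Int) (xs : List Int) : Int :=
  (xs.find? (fun x => decide (x < v))).getD 0

def find_max_diff_alt (arr : List Int) : Int :=
  (List.range arr.length).foldl
    (fun res i =>
      let v := arr.getD i 0
      let left := nearestLT v (arr.take i).reverse
      let right := nearestLT v (arr.drop (i + 1))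
      max res |left - right|)
    (-1)

-- ===== PRECONDITION & SPEC =====
def Spec_find_max_diff (arr : List Int) (out : Int) : Prop := out = find_max_diff_alt arr
instance (arr : List Int) (out : Int) : Decidable (Spec_find_max_diff arr out) := by unfold Spec_find_max_diff; infer_instance

-- ===== CLAIM (what is proved, stated in full; the proofs are below) =====
def Claim_equal_find_max_diff : Prop := ∀ (arr : List Int), Dom_find_max_diff arr → Spec_find_max_diff arr (find_max_diff arr)

-- ===== LEMMAS AND PROOFS =====

/-- The stack after processing a prefix `p`, as a function of `p.reverse`. -/
def gstack : List Int → List Int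
  | [] => []
  | a :: q => a :: popWhile a (gstack q)

theorem popWhile_popWhile (v a : Int) (h : v ≤ a) (s : List Int) :
    popWhile v (popWhile a s) = popWhile v s := by
  induction s with
  | nil => rfl
  | cons t s ih =>
    by_cases hta : t ≥ a
    · simp [popWhile, hta, if_pos (le_trans h hta), ih]
    · simp [popWhile, hta]

/-- Popping everything ≥ v off the stack exposes the nearest element < v. -/
theorem popWhile_gstack (v : Int) (q : List Int) :
    (popWhile v (gstack q)).headD 0 = nearestLT v q := by
  induction q with
  | nil => rfl
  | cons a q ih =>
    by_cases hav : a < v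
    · simp [gstack, popWhile, nearestLT, not_le.mpr hav, hav, List.find?]
    · have hva : v ≤ a := not_lt.mp hav
      simp only [gstack, popWhile, if_pos hva, popWhile_popWhile v a hva, ih,
        nearestLT, List.find?]
      simp [hav]

theorem leftsmaller_aux (rest pref acc : List Int) :
    (rest.foldl
      (fun (st : List Int × List Int) a =>
        let s := popWhile a st.1
        (a :: s, st.2 ++ [s.headD 0]))
      (gstack pref.reverse, acc)).2 =
    acc ++ (List.range rest.length).map
      (fun k => nearestLT (rest.getD k 0) ((pref ++ rest.take k).reverse)) := by
  induction rest generalizing pref acc with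
  | nil => simp
  | cons a rest ih =>
    have hstack : a :: popWhile a (gstack pref.reverse) = gstack ((pref ++ [a]).reverse) := by
      simp [gstack]
    simp only [List.foldl_cons, hstack]
    rw [ih (pref ++ [a]), List.length_cons, List.range_succ_eq_map]
    simp only [List.map_cons, List.map_map, List.take_zero, List.append_nil]
    rw [List.append_assoc, List.singleton_append, popWhile_gstack]
    congr 2
    apply List.map_congr_left
    intro k _
    simp [List.getD, List.append_assoc]

theorem leftsmaller_spec (arr : List Int) :
    leftsmaller arr = (List.range arr.length).map
      (fun k => nearestLT (arr.getD k 0) ((arr.take k).reverse)) := by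
  have h := leftsmaller_aux arr [] []
  simpa [leftsmaller] using h

theorem ls_getD (arr : List Int) (i : ℕ) (hi : i < arr.length) :
    (leftsmaller arr).getD i 0 = nearestLT (arr.getD i 0) ((arr.take i).reverse) := by
  rw [leftsmaller_spec]
  rw [List.getD_eq_getElem?_getD, List.getElem?_map]
  simp [List.getElem?_range hi]

theorem rs_getD (arr : List Int) (i : ℕ) (hi : i < arr.length) :
    (leftsmaller arr.reverse).getD (arr.length - 1 - i) 0 =
      nearestLT (arr.getD i 0) (arr.drop (i + 1)) := by
  have h1 : arr.length - 1 - i < arr.reverse.length := by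
    simp; omega
  rw [ls_getD arr.reverse _ h1]
  have hval : arr.reverse.getD (arr.length - 1 - i) 0 = arr.getD i 0 := by
    rw [List.getD_eq_getElem?_getD, List.getD_eq_getElem?_getD,
      List.getElem?_eq_getElem h1, List.getElem?_eq_getElem hi]
    simp [List.getElem_reverse]
    congr 1
    omega
  have htake : (arr.reverse.take (arr.length - 1 - i)).reverse = arr.drop (i + 1) := by
    rw [List.take_reverse]
    simp only [List.reverse_reverse]
    congr 1
    omega
  rw [hval, htake]

-- ===== VERDICT (by name: the statement is the Claim_ definition above) =====
theorem find_max_diff_spec : Claim_equal_find_max_diff := by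
  intro arr _
  unfold Spec_find_max_diff find_max_diff find_max_diff_alt
  apply PySem.List.foldl_congr_mem
  intro acc i hi
  have hi' : i < arr.length := List.mem_range.mp hi
  simp only [ls_getD arr i hi', rs_getD arr i hi']
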